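-- pv_equiv track=rewrite | github.com/jamie-jjd/110_spring_ids | homework/1/rail_problem.py | solve
-- ===== SOURCE A (Python) =====
-- def solve(n, arr):
--     stack, a = [], 1
--     for b in arr:
--         while len(stack) == 0 or stack[-1] != b:
--             if a > n: return False
--             stack.append(a)
--             a += 1
--         stack.pop()
--     return True
-- ===== SOURCE B (Python) =====
-- def solve(n, arr):
--     stack, i = [], 0
--     for a in range(1, n + 1):
--         stack.append(a)
--         while i < len(arr) and stack and stack[-1] == arr[i]:
--             stack.pop()
--             i += 1
--     return i == len(arr)
-- ===== Notes on version B (the rewrite author's own statement) =====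
-- stated objective: alternative
-- what changed: Replaces A's output-driven simulation (outer loop over arr, inner while pushing 1..n until the top matches) with the dual input-driven simulation: outer loop pushes 1..n in order, inner while pops while the top matches the next element of arr, success iff the whole arr was consumed.
import Mathlib
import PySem

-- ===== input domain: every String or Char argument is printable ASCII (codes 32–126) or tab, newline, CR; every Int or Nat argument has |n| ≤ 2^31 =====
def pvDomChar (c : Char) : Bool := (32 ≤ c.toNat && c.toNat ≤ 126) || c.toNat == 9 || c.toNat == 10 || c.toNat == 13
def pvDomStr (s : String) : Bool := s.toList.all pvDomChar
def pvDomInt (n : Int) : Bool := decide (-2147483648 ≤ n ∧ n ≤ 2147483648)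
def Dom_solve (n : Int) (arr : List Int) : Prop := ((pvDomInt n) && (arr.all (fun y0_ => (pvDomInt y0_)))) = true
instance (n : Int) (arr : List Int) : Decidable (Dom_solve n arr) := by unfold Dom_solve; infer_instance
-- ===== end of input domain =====

-- B replaces A's output-driven simulation (outer loop over arr, inner while pushing) by the dual
-- input-driven simulation (outer loop over the push order 1..n, inner while popping); same cost,
-- different decomposition.

-- ===== PORT A =====
-- The Python stack is represented with its TOP at the HEAD (Python appends/pops at the end).
-- Inner while of A: "while len(stack)==0 or stack[-1] != b: if a > n: return False; push a; a += 1".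
-- none = the 'return False' exit; some (stack, a) = the while exited with top == b.
def solveInnerA (n b : Int) (stack : List Int) (a : Int) : Option (List Int × Int) :=
  if stack.head? ≠ some b then
    if a > n then none
    else solveInnerA n b (a :: stack) (a + 1)
  else some (stack, a)
termination_by (n + 1 - a).toNat
decreasing_by omega

-- "for b in arr: <inner while>; stack.pop()"
def solveLoopA (n : Int) (arr : List Int) (stack : List Int) (a : Int) : Bool :=
  match arr with
  | [] => true
  | b :: rest =>
    match solveInnerA n b stack a with
    | none => false
    | some (s, a') => solveLoopA n rest s.tail a'

def solve (n : Int) (arr : List Int) : Bool := solveLoopA n arr [] 1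

-- ===== PORT B =====
-- Inner while of B: "while i < len(arr) and stack and stack[-1] == arr[i]: stack.pop(); i += 1".
def popLoopB (arr : List Int) (stack : List Int) (i : Nat) : List Int × Nat :=
  match stack with
  | [] => ([], i)
  | t :: s => if arr[i]? = some t then popLoopB arr s (i + 1) else (t :: s, i)

-- "for a in range(1, n+1): stack.append(a); <inner while>; return i == len(arr)".
def solve_alt (n : Int) (arr : List Int) : Bool :=
  let st := (PySem.List.pyRange 1 (n + 1) 1).foldl
      (fun (st : List Int × Nat) a => popLoopB arr (a :: st.1) st.2) ([], 0)
  decide ((st.2 : Int) = arr.length)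

-- ===== PRECONDITION & SPEC =====
def Spec_solve (n : Int) (arr : List Int) (out : Bool) : Prop := out = solve_alt n arr
instance (n : Int) (arr : List Int) (out : Bool) : Decidable (Spec_solve n arr out) := by unfold Spec_solve; infer_instance

-- ===== CLAIM (what is proved, stated in full; the proofs are below) =====
def Claim_equal_solve : Prop := ∀ (n : Int) (arr : List Int), Dom_solve n arr → Spec_solve n arr (solve n arr)

-- ===== LEMMAS AND PROOFS =====

-- Reference run of the common greedy stack process: pop if the top matches the next
-- unconsumed element, else push the next number if it is ≤ n, else stop; returns the
-- unconsumed remainder of arr (so success = the run returns []).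
def runR (n : Int) (stack rest : List Int) (a : Int) : List Int :=
  match rest with
  | [] => []
  | b :: r =>
    match stack with
    | t :: s =>
      if t = b then runR n s r a
      else if a ≤ n then runR n (a :: t :: s) (b :: r) (a + 1) else b :: r
    | [] => if a ≤ n then runR n [a] (b :: r) (a + 1) else b :: r
termination_by (n + 1 - a).toNat + rest.length
decreasing_by all_goals simp only [List.length_cons]; all_goals omega

-- A computes "the reference run consumes everything".
theorem loopA_eq_runR (n : Int) (stack arr : List Int) (a : Int) :
    solveLoopA n arr stack a = decide (runR n stack arr a = []) := by
  induction stack, arr, a using runR.induct n with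
  | case1 stack a => simp [solveLoopA, runR]
  | case2 a r t s ih =>
    rw [solveLoopA, solveInnerA]
    simp only [List.head?_cons, ne_eq, not_true_eq_false]
    rw [runR, if_pos rfl]
    simpa using ih
  | case3 a b r t s hne hle ih =>
    rw [solveLoopA, solveInnerA]
    have h1 : (t :: s).head? ≠ some b := by simp [hne]
    rw [if_pos h1, if_neg (by omega)]
    rw [runR, if_neg hne, if_pos hle]
    rw [← ih, solveLoopA]
  | case4 a b r t s hne hgt =>
    rw [solveLoopA, solveInnerA]
    have h1 : (t :: s).head? ≠ some b := by simp [hne]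
    rw [if_pos h1, if_pos (by omega)]
    rw [runR, if_neg hne, if_neg hgt]
    simp
  | case5 a b r hle ih =>
    rw [solveLoopA, solveInnerA]
    have h1 : ([] : List Int).head? ≠ some b := by simp
    rw [if_pos h1, if_neg (by omega)]
    rw [runR, if_pos hle]
    rw [← ih, solveLoopA]
  | case6 a b r hgt =>
    rw [solveLoopA, solveInnerA]
    have h1 : ([] : List Int).head? ≠ some b := by simp
    rw [if_pos h1, if_pos (by omega)]
    rw [runR, if_neg hgt]
    simp

-- the pop phase never runs i past arr.length
theorem popLoopB_le (arr : List Int) (stack : List Int) (i : Nat) (hi : i ≤ arr.length) :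
    (popLoopB arr stack i).2 ≤ arr.length := by
  induction stack generalizing i with
  | nil => simpa [popLoopB] using hi
  | cons t s ih =>
    rw [popLoopB]
    split
    · rename_i h
      obtain ⟨hlt, -⟩ := List.getElem?_eq_some_iff.mp h
      exact ih (i + 1) hlt
    · simpa using hi

-- the pop phase ends in a normalized state: the top no longer matches arr[i]
theorem popLoopB_norm (arr : List Int) (stack : List Int) (i : Nat) :
    ∀ t, (popLoopB arr stack i).1.head? = some t → arr[(popLoopB arr stack i).2]? ≠ some t := by
  induction stack generalizing i with
  | nil => simp [popLoopB]
  | cons t s ih =>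
    rw [popLoopB]
    split
    · exact ih (i + 1)
    · rename_i h
      intro u hu
      simp at hu
      subst hu
      exact h

-- the pop phase performs exactly the reference run's greedy pops
theorem popLoopB_runR (n : Int) (arr : List Int) (stack : List Int) (i : Nat) (a : Int) :
    runR n stack (arr.drop i) a
      = runR n (popLoopB arr stack i).1 (arr.drop (popLoopB arr stack i).2) a := by
  induction stack generalizing i with
  | nil => simp [popLoopB]
  | cons t s ih =>
    rw [popLoopB]
    split
    · rename_i h
      have hlt : i < arr.length := (List.getElem?_eq_some_iff.mp h).1
      have hdrop : arr.drop i = t :: arr.drop (i + 1) := by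
        rw [List.drop_eq_getElem_cons hlt]
        congr 1
        have := (List.getElem?_eq_some_iff.mp h).2
        simpa using this
      rw [hdrop, runR, if_pos rfl]
      exact ih (i + 1)
    · rfl

-- when the state is normalized, a push step of the reference run commutes with pushing onto the stack
theorem runR_push (n : Int) (arr : List Int) (stack : List Int) (i : Nat) (a : Int)
    (hle : a ≤ n) (hnorm : ∀ t, stack.head? = some t → arr[i]? ≠ some t) :
    runR n stack (arr.drop i) a = runR n (a :: stack) (arr.drop i) (a + 1) := by
  cases hdrop : arr.drop i with
  | nil => rw [runR, runR]
  | cons b r =>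
    have hb : arr[i]? = some b := by
      rw [← List.head?_drop, hdrop]; rfl
    cases stack with
    | nil =>
      conv_lhs => rw [runR]
      rw [if_pos hle]
    | cons t s =>
      have hne : t ≠ b := by
        intro he; exact hnorm t rfl (he ▸ hb)
      conv_lhs => rw [runR]
      rw [if_neg hne, if_pos hle]

-- a stopped run (a > n) in a normalized state leaves the remainder unchanged
theorem runR_stop (n : Int) (arr : List Int) (stack : List Int) (i : Nat) (a : Int)
    (hgt : ¬ a ≤ n) (hnorm : ∀ t, stack.head? = some t → arr[i]? ≠ some t) :
    runR n stack (arr.drop i) a = arr.drop i := by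
  cases hdrop : arr.drop i with
  | nil => rw [runR]
  | cons b r =>
    have hb : arr[i]? = some b := by
      rw [← List.head?_drop, hdrop]; rfl
    cases stack with
    | nil => rw [runR, if_neg hgt]
    | cons t s =>
      have hne : t ≠ b := by
        intro he; exact hnorm t rfl (he ▸ hb)
      rw [runR, if_neg hne, if_neg hgt]

-- B's fold over the push order computes the reference run
theorem fold_runR (n : Int) (arr : List Int) :
    ∀ (a : Int) (stack : List Int) (i : Nat),
      i ≤ arr.length → (∀ t, stack.head? = some t → arr[i]? ≠ some t) →
      ((PySem.List.pyRange a (n + 1) 1).foldl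
        (fun (st : List Int × Nat) a => popLoopB arr (a :: st.1) st.2) (stack, i)).2 ≤ arr.length ∧
      arr.drop ((PySem.List.pyRange a (n + 1) 1).foldl
        (fun (st : List Int × Nat) a => popLoopB arr (a :: st.1) st.2) (stack, i)).2
        = runR n stack (arr.drop i) a := by
  intro a
  induction hfuel : (n + 1 - a).toNat generalizing a with
  | zero =>
    intro stack i hi hnorm
    rw [PySem.List.pyRange_one_eq_nil (by omega)]
    exact ⟨hi, (runR_stop n arr stack i a (by omega) hnorm).symm⟩
  | succ k ih =>
    intro stack i hi hnorm
    have hlt : a < n + 1 := by omega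
    rw [PySem.List.pyRange_one_cons hlt, List.foldl_cons]
    have hle' : (popLoopB arr (a :: stack) i).2 ≤ arr.length := popLoopB_le arr (a :: stack) i hi
    have hnorm' := popLoopB_norm arr (a :: stack) i
    have hmain := ih (a + 1) (by omega) (popLoopB arr (a :: stack) i).1
      (popLoopB arr (a :: stack) i).2 hle' hnorm'
    refine ⟨hmain.1, ?_⟩
    rw [hmain.2, ← popLoopB_runR, ← runR_push n arr stack i a (by omega) hnorm]

-- ===== VERDICT (by name: the statement is the Claim_ definition above) =====
theorem solve_spec : Claim_equal_solve := by
  intro n arr _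
  unfold Spec_solve solve solve_alt
  rw [loopA_eq_runR]
  obtain ⟨hle, hdrop⟩ := fold_runR n arr 1 [] 0 (by omega) (by simp)
  simp only [List.drop_zero] at hdrop
  rw [← hdrop]
  simp only [decide_eq_decide, List.drop_eq_nil_iff]
  omega
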